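-- pv_equiv track=rewrite | github.com/AlexandreMoreau2002/python_apprendre_en_ligne | 6_dilemme_du_prisonnier/6.5.py | dix2shadok
-- ===== SOURCE A (Python) =====
-- def dix2shadok(nombre):
--     # convertit un nombre decimal en nombre shadok
--     quatre2shadok = {0:"GA", 1:"BU", 2:"ZO", 3:"MEU"}
--     shadok = ""
--     if nombre == 0:
--         return "GA"
--     while nombre != 0:
--         chif = nombre%4
--         shadok = quatre2shadok[chif] + " " + shadok
--         nombre = nombre//4
--     return shadok
-- ===== SOURCE B (Python) =====
-- def dix2shadok(nombre):
--     # convertit un nombre decimal en nombre shadok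
--     # MSB-first: trouve la plus grande puissance de 4 <= nombre, puis extrait
--     # les chiffres du plus significatif au moins significatif dans une liste.
--     table = ["GA ", "BU ", "ZO ", "MEU "]
--     if nombre == 0:
--         return "GA"
--     p = 1
--     while p * 4 <= nombre:
--         p *= 4
--     morceaux = []
--     while p > 0:
--         morceaux.append(table[nombre // p])
--         nombre %= p
--         p //= 4
--     return "".join(morceaux)
-- ===== Notes on version B (the rewrite author's own statement) =====
-- stated objective: alternative
-- what changed: Replaces the LSB-first while-loop that prepends each word to a string accumulator by an MSB-first algorithm: find the largest power of 4 <= n, extract digits by dividing by descending powers into a list, and join once at the end.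
import Mathlib
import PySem

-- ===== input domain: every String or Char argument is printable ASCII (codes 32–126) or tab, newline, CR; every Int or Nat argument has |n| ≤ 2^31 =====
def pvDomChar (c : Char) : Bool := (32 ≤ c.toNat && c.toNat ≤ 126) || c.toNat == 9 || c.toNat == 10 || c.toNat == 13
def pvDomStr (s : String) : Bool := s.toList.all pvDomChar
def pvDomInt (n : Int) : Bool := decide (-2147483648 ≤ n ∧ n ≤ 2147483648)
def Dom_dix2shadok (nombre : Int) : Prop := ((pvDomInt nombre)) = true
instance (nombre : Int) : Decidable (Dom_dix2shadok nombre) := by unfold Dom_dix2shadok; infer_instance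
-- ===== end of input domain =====

-- B replaces A's LSB-first string-prepend loop by an MSB-first algorithm: find the largest
-- power of 4 ≤ n, extract digits by descending powers into a list, join once ('alternative').

-- ===== PORT A =====
-- dict {0:"GA",1:"BU",2:"ZO",3:"MEU"} lookup; exact because the key is always nombre % 4 ∈ {0,1,2,3} when 0 < nombre
def quatre2shadok (chif : Int) : String :=
  if chif = 0 then "GA" else if chif = 1 then "BU" else if chif = 2 then "ZO" else "MEU"

-- the while loop; for nombre < 0 the guard is false and the port returns the accumulator (Python loops forever there; excluded by Pre_)
def dix2shadokLoop (nombre : Int) (shadok : String) : String :=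
  if h : 0 < nombre then
    dix2shadokLoop (PySem.Int.floordiv nombre 4)
      (quatre2shadok (PySem.Int.mod nombre 4) ++ " " ++ shadok)
  else shadok
termination_by nombre.toNat
decreasing_by
  have h4 : PySem.Int.floordiv nombre 4 = nombre / 4 := PySem.Int.floordiv_eq_ediv_of_pos (by omega)
  omega

def dix2shadok (nombre : Int) : String :=
  if nombre = 0 then "GA" else dix2shadokLoop nombre ""

-- ===== PORT B =====
-- table[d]: Python list indexing (negative index wraps); the .getD "" default is only
-- reached where Python would raise IndexError, which never happens inside Pre_
def pvShadokTable (d : Int) : String :=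
  (PySem.List.pyGet? ["GA ", "BU ", "ZO ", "MEU "] d).getD ""

-- while p * 4 <= nombre: p *= 4   (the '1 ≤ p' conjunct is a totality guard only: p starts at 1 and only grows)
def pvFindPow (nombre p : Int) : Int :=
  if h : 1 ≤ p ∧ p * 4 ≤ nombre then pvFindPow nombre (p * 4) else p
termination_by (nombre - p).toNat
decreasing_by omega

-- while p > 0: morceaux.append(table[nombre // p]); nombre %= p; p //= 4
def pvEmit (nombre p : Int) (morceaux : List String) : List String :=
  if h : 0 < p then
    pvEmit (PySem.Int.mod nombre p) (PySem.Int.floordiv p 4)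
      (morceaux ++ [pvShadokTable (PySem.Int.floordiv nombre p)])
  else morceaux
termination_by p.toNat
decreasing_by
  have h4 : PySem.Int.floordiv p 4 = p / 4 := PySem.Int.floordiv_eq_ediv_of_pos (by omega)
  omega

def dix2shadok_alt (nombre : Int) : String :=
  if nombre = 0 then "GA"
  else PySem.Str.join "" (pvEmit nombre (pvFindPow nombre 1) [])

-- ===== PRECONDITION & SPEC =====
-- A's while loop never terminates on negative input (nombre//4 stalls at -1), so A returns only for 0 ≤ nombre.
def Pre_dix2shadok (nombre : Int) : Prop := 0 ≤ nombre
instance (nombre : Int) : Decidable (Pre_dix2shadok nombre) := by unfold Pre_dix2shadok; infer_instance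
def pvWitness_dix2shadok : Int := (9)

def Spec_dix2shadok (nombre : Int) (out : String) : Prop := out = dix2shadok_alt nombre
instance (nombre : Int) (out : String) : Decidable (Spec_dix2shadok nombre out) := by unfold Spec_dix2shadok; infer_instance

-- ===== CLAIM =====
def Claim_equal_dix2shadok : Prop := ∀ (nombre : Int), Dom_dix2shadok nombre → Pre_dix2shadok nombre → Spec_dix2shadok nombre (dix2shadok nombre)

-- ===== LEMMAS AND PROOFS =====
-- canonical form: the base-4 shadok string of n, most-significant digit first, no leading zeros
def shadokRec (n : Int) : String :=
  if h : 0 < n then shadokRec (n / 4) ++ quatre2shadok (n % 4) ++ " " else ""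
termination_by n.toNat
decreasing_by omega

-- the same string padded with leading "GA " words to exactly k digits
def padStr : Int → Nat → String
  | _, 0 => ""
  | n, k + 1 => padStr (n / 4) k ++ quatre2shadok (n % 4) ++ " "

theorem intercalate_nil_eq (l : List (List Char)) : [].intercalate l = l.flatten := by
  induction l with
  | nil => simp [List.intercalate]
  | cons a t ih =>
    cases t with
    | nil => simp [List.intercalate]
    | cons b t2 =>
      simp [List.intercalate, List.intersperse] at *
      simpa [List.flatten] using ih

theorem join_append_one (out : List String) (w : String) :
    PySem.Str.join "" (out ++ [w]) = PySem.Str.join "" out ++ w := by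
  simp [PySem.Str.join, PySem.Chars.join, intercalate_nil_eq]

theorem loop_eq_rec_append (nombre : Int) (shadok : String) :
    dix2shadokLoop nombre shadok = shadokRec nombre ++ shadok := by
  induction nombre, shadok using dix2shadokLoop.induct with
  | case1 n s h ih =>
      have hf : PySem.Int.floordiv n 4 = n / 4 := PySem.Int.floordiv_eq_ediv_of_pos (by omega)
      have hm : PySem.Int.mod n 4 = n % 4 := PySem.Int.mod_eq_emod_of_pos (by omega)
      rw [dix2shadokLoop, shadokRec, dif_pos h, dif_pos h, hf, hm]
      rw [hf, hm] at ih
      rw [ih]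
      simp [String.append_assoc]
  | case2 n s h =>
      rw [dix2shadokLoop, shadokRec, dif_neg h, dif_neg h]
      simp

theorem pvShadokTable_eq (d : Int) (h0 : 0 ≤ d) (h4 : d < 4) :
    pvShadokTable d = quatre2shadok d ++ " " := by
  have : d = 0 ∨ d = 1 ∨ d = 2 ∨ d = 3 := by omega
  rcases this with h | h | h | h <;> subst h <;> decide

theorem ediv_ediv_four (n P : ℤ) : n / 4 / P = n / (4 * P) :=
  Int.ediv_ediv_of_nonneg (by norm_num : (0:ℤ) ≤ 4)

theorem emod_mul_ediv_four (n P : ℤ) : n % (4 * P) / 4 = n / 4 % P := by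
  rw [Int.emod_def, Int.emod_def, ← ediv_ediv_four n P]
  have e : n - 4 * P * (n / 4 / P) = n + (-(P * (n / 4 / P))) * 4 := by ring
  rw [e, Int.add_mul_ediv_right _ _ (by norm_num : (4:ℤ) ≠ 0)]
  ring

theorem padStr_split (k : Nat) : ∀ n : Int, 0 ≤ n → n < 4 ^ (k + 1) →
    padStr n (k + 1) = pvShadokTable (n / 4 ^ k) ++ padStr (n % 4 ^ k) k := by
  induction k with
  | zero =>
    intro n h0 h4
    simp only [pow_zero] at *
    rw [padStr, padStr, padStr, Int.ediv_one, pvShadokTable_eq n h0 h4]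
    have : n % 4 = n := by omega
    rw [this]
    simp
  | succ k ih =>
    intro n h0 h4
    have hP : (0:ℤ) < 4 ^ k := by positivity
    have hd4 : n / 4 < 4 ^ (k + 1) := by
      rw [pow_succ] at h4
      omega
    have hd0 : 0 ≤ n / 4 := by omega
    show padStr (n / 4) (k + 1) ++ quatre2shadok (n % 4) ++ " " = _
    rw [ih (n / 4) hd0 hd4]
    have e1 : n / 4 / 4 ^ k = n / 4 ^ (k + 1) := by
      rw [ediv_ediv_four, ← pow_succ']
    have e2 : n / 4 % 4 ^ k = n % 4 ^ (k + 1) / 4 := by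
      rw [pow_succ', ← emod_mul_ediv_four]
    have e3 : n % 4 ^ (k + 1) % 4 = n % 4 := by
      refine Int.emod_emod_of_dvd n ⟨4 ^ k, ?_⟩
      rw [pow_succ']
    rw [e1, e2]
    conv_rhs => rw [padStr, e3]
    simp [String.append_assoc]

theorem shadokRec_eq_padStr (k : Nat) : ∀ n : Int, 4 ^ k ≤ n → n < 4 ^ (k + 1) →
    shadokRec n = padStr n (k + 1) := by
  induction k with
  | zero =>
    intro n h1 h4
    simp only [pow_zero] at *
    rw [shadokRec, dif_pos (by omega : (0:ℤ) < n)]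
    have : n / 4 = 0 := by omega
    rw [this, shadokRec, dif_neg (by omega : ¬ (0:ℤ) < 0)]
    rw [padStr, padStr]
  | succ k ih =>
    intro n h1 h4
    have hP : (0:ℤ) < 4 ^ k := by positivity
    have hlo : 4 ^ k ≤ n / 4 := by
      rw [pow_succ] at h1
      omega
    have hhi : n / 4 < 4 ^ (k + 1) := by
      rw [pow_succ] at h4
      omega
    have hpos : (0:ℤ) < n := lt_of_lt_of_le (by positivity) h1
    rw [shadokRec, dif_pos hpos]
    rw [ih (n / 4) hlo hhi]
    rfl

theorem emit_join (k : Nat) : ∀ (n : Int) (out : List String), 0 ≤ n → n < 4 ^ (k + 1) →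
    PySem.Str.join "" (pvEmit n (4 ^ k) out) = PySem.Str.join "" out ++ padStr n (k + 1) := by
  induction k with
  | zero =>
    intro n out h0 h4
    simp only [pow_zero] at *
    rw [pvEmit, dif_pos (by omega : (0:ℤ) < 1)]
    have e1 : PySem.Int.mod n 1 = 0 := by
      rw [PySem.Int.mod_eq_emod_of_pos (by omega : (0:ℤ) < 1), Int.emod_one]
    have e2 : PySem.Int.floordiv (1:ℤ) 4 = 0 := by decide
    have e3 : PySem.Int.floordiv n 1 = n := by
      rw [PySem.Int.floordiv_eq_ediv_of_pos (by omega : (0:ℤ) < 1), Int.ediv_one]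
    rw [e1, e2, e3, pvEmit, dif_neg (by omega : ¬ (0:ℤ) < 0), join_append_one,
      pvShadokTable_eq n h0 h4]
    have : n % 4 = n := by omega
    rw [padStr, padStr, this]
    simp
  | succ k ih =>
    intro n out h0 h4
    have hP : (0:ℤ) < 4 ^ (k + 1) := by positivity
    rw [pvEmit, dif_pos hP]
    have e1 : PySem.Int.mod n (4 ^ (k + 1)) = n % 4 ^ (k + 1) :=
      PySem.Int.mod_eq_emod_of_pos hP
    have e2 : PySem.Int.floordiv ((4:ℤ) ^ (k + 1)) 4 = 4 ^ k := by
      rw [PySem.Int.floordiv_eq_ediv_of_pos (by omega : (0:ℤ) < 4), pow_succ,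
        Int.mul_ediv_cancel _ (by norm_num : (4:ℤ) ≠ 0)]
    have e3 : PySem.Int.floordiv n (4 ^ (k + 1)) = n / 4 ^ (k + 1) :=
      PySem.Int.floordiv_eq_ediv_of_pos hP
    rw [e1, e2, e3]
    rw [ih (n % 4 ^ (k + 1)) _ (Int.emod_nonneg n (by positivity)) (Int.emod_lt_of_pos n hP)]
    rw [join_append_one, padStr_split (k + 1) n h0 h4]
    simp [String.append_assoc]

theorem findPow_spec (nombre p : Int) :
    1 ≤ p → p ≤ nombre →
      ∃ k : Nat, pvFindPow nombre p = p * 4 ^ k ∧ p * 4 ^ k ≤ nombre ∧ nombre < p * 4 ^ (k + 1) := by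
  induction p using pvFindPow.induct nombre with
  | case1 p h ih =>
    intro hp hn
    obtain ⟨k, e, lb, ub⟩ := ih (by omega) h.2
    refine ⟨k + 1, ?_, ?_, ?_⟩
    · rw [pvFindPow, dif_pos h, e]; ring
    · calc p * 4 ^ (k + 1) = p * 4 * 4 ^ k := by ring
        _ ≤ nombre := lb
    · calc nombre < p * 4 * 4 ^ (k + 1) := ub
        _ = p * 4 ^ (k + 1 + 1) := by ring
  | case2 p h =>
    intro hp hn
    refine ⟨0, ?_, by simpa using hn, ?_⟩
    · rw [pvFindPow, dif_neg h]; ring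
    · have hc : ¬ (p * 4 ≤ nombre) := fun hc => h ⟨hp, hc⟩
      simp only [zero_add, pow_one]
      omega

-- ===== VERDICT =====
theorem dix2shadok_spec : Claim_equal_dix2shadok := by
  intro nombre _ hpre
  unfold Spec_dix2shadok dix2shadok dix2shadok_alt
  by_cases h0 : nombre = 0
  · simp [h0]
  · have h1 : (1:ℤ) ≤ nombre := by
      unfold Pre_dix2shadok at hpre; omega
    rw [if_neg h0, if_neg h0]
    obtain ⟨k, e, lb, ub⟩ := findPow_spec nombre 1 le_rfl h1
    rw [one_mul] at lb ub
    rw [e, one_mul, loop_eq_rec_append]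
    rw [emit_join k nombre [] (by omega) ub]
    rw [shadokRec_eq_padStr k nombre lb ub]
    simp [PySem.Str.join, PySem.Chars.join, List.intercalate]
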